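-- pv_equiv track=rewrite | github.com/xcczach/mer-testbench | test_bench.py | official_get_prediction_and_true_ids
-- ===== SOURCE A (Python) =====
-- def official_get_prediction_and_true_ids(
--     emotion_groups: list[list], prediction_emotions: list[str], true_emotions: list[str]
-- ) -> tuple[set[int], set[int]]:
--     synonym_map = {}
--     for one_list in emotion_groups:
--         for i in range(len(one_list)):
--             synonym_map[one_list[i]] = one_list[0]
--     prediction_emotions = [item.lower() for item in prediction_emotions]
--     prediction_ids = set(
--         [
--             synonym_map[item] if item in synonym_map else item
--             for item in prediction_emotions
--         ]
--     )
--
--     true_emotions = [item.lower() for item in true_emotions]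
--     true_ids = set(
--         [synonym_map[item] if item in synonym_map else item for item in true_emotions]
--     )
--     return prediction_ids, true_ids
-- ===== SOURCE B (Python) =====
-- def official_get_prediction_and_true_ids(
--     emotion_groups: list[list], prediction_emotions: list[str], true_emotions: list[str]
-- ) -> tuple[set[int], set[int]]:
--     # No synonym_map: canonicalise each item by scanning the groups directly
--     # (last matching group wins, mirroring dict overwrite order).
--     def canon(item):
--         c = item
--         for group in emotion_groups:
--             if item in group:
--                 c = group[0]
--         return c
--
--     prediction_ids = {canon(item.lower()) for item in prediction_emotions}
--     true_ids = {canon(item.lower()) for item in true_emotions}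
--     return prediction_ids, true_ids
-- ===== Notes on version B (the rewrite author's own statement) =====
-- stated objective: simpler
-- what changed: B drops the synonym_map dict entirely: each lowercased emotion is canonicalised by a direct scan over emotion_groups (last matching group wins, matching dict overwrite order).
import Mathlib
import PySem

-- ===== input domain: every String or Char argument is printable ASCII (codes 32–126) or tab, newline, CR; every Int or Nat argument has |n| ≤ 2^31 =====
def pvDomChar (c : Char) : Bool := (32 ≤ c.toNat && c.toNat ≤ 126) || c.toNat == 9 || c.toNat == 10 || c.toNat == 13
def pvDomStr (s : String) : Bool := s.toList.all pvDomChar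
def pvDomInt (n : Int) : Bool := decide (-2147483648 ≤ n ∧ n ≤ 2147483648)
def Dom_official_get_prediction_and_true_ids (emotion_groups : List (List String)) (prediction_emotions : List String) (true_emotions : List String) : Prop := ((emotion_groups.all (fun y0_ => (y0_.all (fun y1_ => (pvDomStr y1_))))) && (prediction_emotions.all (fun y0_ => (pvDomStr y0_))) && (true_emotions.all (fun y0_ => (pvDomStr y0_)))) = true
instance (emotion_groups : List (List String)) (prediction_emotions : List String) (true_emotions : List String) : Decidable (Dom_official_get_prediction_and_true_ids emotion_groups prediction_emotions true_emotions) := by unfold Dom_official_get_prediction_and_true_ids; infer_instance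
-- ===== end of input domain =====

-- B replaces A's precomputed synonym_map dict by a direct per-item scan over the
-- groups (last matching group wins, matching dict overwrite order): simpler, no index built.


-- ===== PORT A =====
-- one_list[i] / one_list[0] are only read with i in range(len(one_list)), so the
-- pyGetD default "" is never hit; the lookup 'synonym_map[item] if item in synonym_map
-- else item' is ported with the same guard.
def official_get_prediction_and_true_ids (emotion_groups : List (List String)) (prediction_emotions : List String) (true_emotions : List String) : List String × List String :=
  let synonym_map : PySem.Dict String String :=
    emotion_groups.foldl (fun d one_list =>
      (PySem.List.pyRange 0 (PySem.List.len one_list) 1).foldl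
        (fun d i => d.insert (PySem.List.pyGetD one_list i "") (PySem.List.pyGetD one_list 0 "")) d)
      PySem.Dict.empty
  let prediction_emotions := prediction_emotions.map PySem.Str.lower
  let prediction_ids := PySem.Set.ofList (prediction_emotions.map (fun item =>
      if synonym_map.contains item then synonym_map.getD item "" else item))
  let true_emotions := true_emotions.map PySem.Str.lower
  let true_ids := PySem.Set.ofList (true_emotions.map (fun item =>
      if synonym_map.contains item then synonym_map.getD item "" else item))
  (prediction_ids, true_ids)

-- ===== PORT B =====
-- 'c = group[0]' is guarded by 'item in group', so the group is nonempty there; headD's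
-- default is never hit.
def pvCanon (emotion_groups : List (List String)) (item : String) : String :=
  emotion_groups.foldl (fun c group => if group.contains item then group.headD c else c) item

def official_get_prediction_and_true_ids_alt (emotion_groups : List (List String)) (prediction_emotions : List String) (true_emotions : List String) : List String × List String :=
  let prediction_ids := PySem.Set.ofList (prediction_emotions.map (fun item => pvCanon emotion_groups (PySem.Str.lower item)))
  let true_ids := PySem.Set.ofList (true_emotions.map (fun item => pvCanon emotion_groups (PySem.Str.lower item)))
  (prediction_ids, true_ids)

-- ===== PRECONDITION & SPEC =====
def Spec_official_get_prediction_and_true_ids (emotion_groups : List (List String)) (prediction_emotions : List String) (true_emotions : List String) (out : List String × List String) : Prop := out = official_get_prediction_and_true_ids_alt emotion_groups prediction_emotions true_emotions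
instance (emotion_groups : List (List String)) (prediction_emotions : List String) (true_emotions : List String) (out : List String × List String) : Decidable (Spec_official_get_prediction_and_true_ids emotion_groups prediction_emotions true_emotions out) := by unfold Spec_official_get_prediction_and_true_ids; infer_instance

-- ===== CLAIM (what is proved, stated in full; the proofs are below) =====
def Claim_equal_official_get_prediction_and_true_ids : Prop := ∀ (emotion_groups : List (List String)) (prediction_emotions : List String) (true_emotions : List String), Dom_official_get_prediction_and_true_ids emotion_groups prediction_emotions true_emotions → Spec_official_get_prediction_and_true_ids emotion_groups prediction_emotions true_emotions (official_get_prediction_and_true_ids emotion_groups prediction_emotions true_emotions)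

-- ===== LEMMAS AND PROOFS =====

-- Folding inserts of a constant value v over the elements of g.
theorem pv_foldl_insert_getD (g : List String) (v : String) (d : PySem.Dict String String) (k d0 : String) :
    (g.foldl (fun d x => d.insert x v) d).getD k d0 = if k ∈ g then v else d.getD k d0 := by
  induction g generalizing d with
  | nil => simp
  | cons a t ih =>
      simp only [List.foldl_cons, ih, PySem.Dict.getD_insert, List.mem_cons]
      by_cases ht : k ∈ t <;> by_cases ha : k = a <;> simp [ht, ha]

theorem pv_foldl_insert_contains (g : List String) (v : String) (d : PySem.Dict String String) (k : String) :
    (g.foldl (fun d x => d.insert x v) d).contains k = (decide (k ∈ g) || d.contains k) := by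
  induction g generalizing d with
  | nil => simp
  | cons a t ih =>
      simp only [List.foldl_cons, ih, PySem.Dict.contains_insert, List.mem_cons]
      by_cases ht : k ∈ t <;> by_cases ha : k = a <;> simp [ht, ha, beq_iff_eq]

-- The guarded lookup through A's whole synonym_map equals B's direct scan.
theorem pv_lookup_eq_canon (emotion_groups : List (List String)) (k : String) :
    (let sm := emotion_groups.foldl (fun d one_list =>
        (PySem.List.pyRange 0 (PySem.List.len one_list) 1).foldl
          (fun d i => d.insert (PySem.List.pyGetD one_list i "") (PySem.List.pyGetD one_list 0 "")) d)
        PySem.Dict.empty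
     if sm.contains k then sm.getD k "" else k) = pvCanon emotion_groups k := by
  simp only [pvCanon]
  suffices h : ∀ d : PySem.Dict String String,
      (let sm := emotion_groups.foldl (fun d one_list =>
          (PySem.List.pyRange 0 (PySem.List.len one_list) 1).foldl
            (fun d i => d.insert (PySem.List.pyGetD one_list i "") (PySem.List.pyGetD one_list 0 "")) d) d
       if sm.contains k then sm.getD k "" else k)
      = emotion_groups.foldl (fun c group => if group.contains k then group.headD c else c)
          (if d.contains k then d.getD k "" else k) by
    simpa using h PySem.Dict.empty
  induction emotion_groups with
  | nil => intro d; simp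
  | cons g t ih =>
      intro d
      simp only [List.foldl_cons]
      rw [ih]
      congr 1
      rw [PySem.List.foldl_pyRange_zero_pyGetD g "" (fun (d : PySem.Dict String String) (x : String) => PySem.Dict.insert d x (PySem.List.pyGetD g 0 "")) d]
      rw [pv_foldl_insert_contains, pv_foldl_insert_getD]
      by_cases hg : k ∈ g
      · have hne : g ≠ [] := by rintro rfl; simp at hg
        simp [hg, List.headD, PySem.List.pyGetD, PySem.List.pyGet?]
        match g, hne with
        | a :: t, _ => simp [PySem.List.pyIdx?]
      · simp [hg]

-- ===== VERDICT (by name: the statement is the Claim_ definition above) =====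
theorem official_get_prediction_and_true_ids_spec : Claim_equal_official_get_prediction_and_true_ids := by
  intro eg pe te _
  show _ = _
  simp only [official_get_prediction_and_true_ids, official_get_prediction_and_true_ids_alt,
    List.map_map]
  refine congrArg₂ Prod.mk (congrArg _ (List.map_congr_left ?_)) (congrArg _ (List.map_congr_left ?_)) <;>
    · intro x _
      exact pv_lookup_eq_canon eg (PySem.Str.lower x)
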